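-- pv_equiv track=rewrite | github.com/DenisLo-master/Course2-geek-brains- | HW3/Task6.py | sum_between
-- ===== SOURCE A (Python) =====
-- def sum_between(list1):
--     try:
--         list1 = list(map(int, list1))
--         _list = list1.copy()
--         _list.sort()
--         min = list1.index(_list[0])
--         max = list1.index(_list[-1])
--         res = 0
--         for _num in range(len(_list)):
--             if _list[_num] == list1[min] or _list[_num] == list1[max]:
--                 _list[_num]=0
--             else:
--                 res += _list[_num]
--         return f'Список: {list1}\nСумма между min({list1[min]}) и max({list1[max]}): {res}'
--     except ValueError or TypeError:
--         return f'\nОШИБКА: необходимо передать только массив чисел'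
-- ===== SOURCE B (Python) =====
-- def sum_between(list1):
--     try:
--         list1 = list(map(int, list1))
--         mn = mx = list1[0]
--         for x in list1:
--             if x < mn:
--                 mn = x
--             if x > mx:
--                 mx = x
--         res = sum(x for x in list1 if x != mn and x != mx)
--         return f'Список: {list1}\nСумма между min({mn}) и max({mx}): {res}'
--     except ValueError:
--         return f'\nОШИБКА: необходимо передать только массив чисел'
-- ===== Notes on version B (the rewrite author's own statement) =====
-- stated objective: simpler
-- what changed: B drops the sort/copy/index machinery and the element-zeroing loop: one linear scan finds min and max, then a single filtered sum computes the result, with no sorting and no list mutation.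
-- outside the precondition, e.g. on sum_between([]): A raises IndexError, B raises IndexError
import Mathlib
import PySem

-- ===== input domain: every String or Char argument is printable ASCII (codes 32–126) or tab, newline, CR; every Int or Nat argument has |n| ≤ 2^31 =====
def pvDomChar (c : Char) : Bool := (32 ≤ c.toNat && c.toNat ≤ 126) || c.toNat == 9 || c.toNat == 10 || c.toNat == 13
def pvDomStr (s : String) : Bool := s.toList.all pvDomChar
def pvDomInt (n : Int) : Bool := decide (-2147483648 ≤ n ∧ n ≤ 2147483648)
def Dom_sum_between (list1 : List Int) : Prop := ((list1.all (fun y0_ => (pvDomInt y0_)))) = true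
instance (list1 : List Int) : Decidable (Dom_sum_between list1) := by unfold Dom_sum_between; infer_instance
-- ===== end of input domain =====

-- B replaces A's copy + sort + index bookkeeping by one linear min/max scan and a single filtered sum (objective: simpler).


-- the shared f-string  f'Список: {list1}\nСумма между min({…}) и max({…}): {…}'  (identical text in A and B)
def pvMsg (l : List Int) (mn mx res : Int) : String :=
  "Список: [" ++ String.intercalate ", " (l.map PySem.Int.toStr) ++ "]" ++
  "\nСумма между min(" ++ PySem.Int.toStr mn ++ ") и max(" ++ PySem.Int.toStr mx ++ "): " ++ PySem.Int.toStr res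

-- ===== PORT A =====
-- list(map(int, list1)) is the identity on a List Int and is dropped on both sides.
def sum_between (list1 : List Int) : String :=
  let _list := PySem.List.sorted list1 (fun x => x) false
  match PySem.List.pyGet? _list 0, PySem.List.pyGet? _list (-1) with
  | some s0, some sl =>
    match PySem.List.index? list1 s0, PySem.List.index? list1 sl with
    | some mi, some ma =>
      -- list1[min], list1[max]: the index returned by list.index is always in range
      let minv := PySem.List.pyGetD list1 (mi : Int) 0
      let maxv := PySem.List.pyGetD list1 (ma : Int) 0
      let st := (PySem.List.pyRange 0 (_list.length : Int) 1).foldl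
        (fun (st : List Int × Int) num =>
          let v := PySem.List.pyGetD st.1 num 0        -- _list[_num]; _num ∈ range(len(_list))
          if v = minv ∨ v = maxv then (st.1.set num.toNat 0, st.2)
          else (st.1, st.2 + v)) (_list, 0)
      pvMsg list1 minv maxv st.2
    | _, _ => ""  -- unreachable: list.index of a member never raises here
  | _, _ => ""    -- IndexError on the empty list: excluded by Pre_

-- ===== PORT B =====
def sum_between_alt (list1 : List Int) : String :=
  match PySem.List.pyGet? list1 0 with
  | none => ""    -- IndexError on the empty list: excluded by Pre_
  | some h =>
    let p := list1.foldl (fun (p : Int × Int) x =>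
        ((if x < p.1 then x else p.1), (if x > p.2 then x else p.2))) (h, h)
    let res := (list1.filter (fun x => x != p.1 && x != p.2)).sum
    pvMsg list1 p.1 p.2 res

-- ===== PRECONDITION & SPEC =====
-- A raises IndexError on [] (sorted list indexed at 0); B raises the same; excluded.
def Pre_sum_between (list1 : List Int) : Prop := list1 ≠ []
instance (list1 : List Int) : Decidable (Pre_sum_between list1) := by unfold Pre_sum_between; infer_instance
def pvWitness_sum_between : List Int := ([3, 1, 2, 5, 5, 1])

def Spec_sum_between (list1 : List Int) (out : String) : Prop := out = sum_between_alt list1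
instance (list1 : List Int) (out : String) : Decidable (Spec_sum_between list1 out) := by unfold Spec_sum_between; infer_instance

-- ===== CLAIM (what is proved, stated in full; the proofs are below) =====
def Claim_equal_sum_between : Prop := ∀ (list1 : List Int), Dom_sum_between list1 → Pre_sum_between list1 → Spec_sum_between list1 (sum_between list1)

-- ===== LEMMAS AND PROOFS =====

-- B's fold components: each accumulator of the single scan is a member (or the seed) and a lower/upper bound.
theorem pv_foldMin (l : List Int) : ∀ (a : Int),
    ((l.foldl (fun m x => if x < m then x else m) a) = a ∨ (l.foldl (fun m x => if x < m then x else m) a) ∈ l) ∧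
    (l.foldl (fun m x => if x < m then x else m) a) ≤ a ∧
    (∀ x ∈ l, (l.foldl (fun m x => if x < m then x else m) a) ≤ x) := by
  induction l with
  | nil => intro a; simp
  | cons y t ih =>
    intro a
    obtain ⟨h1, h2, h3⟩ := ih (if y < a then y else a)
    simp only [List.foldl_cons]
    by_cases hy : y < a <;> simp only [hy, ite_true, ite_false] at h1 h2 h3 ⊢
    · refine ⟨?_, by omega, ?_⟩
      · rcases h1 with h | h
        · right; simp [h]
        · right; simp [h]
      · intro x hx
        rcases List.mem_cons.mp hx with rfl | hx
        · omega
        · exact h3 x hx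
    · refine ⟨?_, h2, ?_⟩
      · rcases h1 with h | h
        · left; exact h
        · right; simp [h]
      · intro x hx
        rcases List.mem_cons.mp hx with rfl | hx
        · omega
        · exact h3 x hx
theorem pv_foldMax (l : List Int) : ∀ (a : Int),
    ((l.foldl (fun m x => if x > m then x else m) a) = a ∨ (l.foldl (fun m x => if x > m then x else m) a) ∈ l) ∧
    a ≤ (l.foldl (fun m x => if x > m then x else m) a) ∧
    (∀ x ∈ l, x ≤ (l.foldl (fun m x => if x > m then x else m) a)) := by
  induction l with
  | nil => intro a; simp
  | cons y t ih =>
    intro a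
    obtain ⟨h1, h2, h3⟩ := ih (if y > a then y else a)
    simp only [List.foldl_cons]
    by_cases hy : y > a <;> simp only [hy, ite_true, ite_false] at h1 h2 h3 ⊢
    · refine ⟨?_, by omega, ?_⟩
      · rcases h1 with h | h
        · right; simp [h]
        · right; simp [h]
      · intro x hx
        rcases List.mem_cons.mp hx with rfl | hx
        · omega
        · exact h3 x hx
    · refine ⟨?_, h2, ?_⟩
      · rcases h1 with h | h
        · left; exact h
        · right; simp [h]
      · intro x hx
        rcases List.mem_cons.mp hx with rfl | hx
        · omega
        · exact h3 x hx

-- A's loop over range(len(_list)) with the in-place zeroing: the zeroed prefix never affects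
-- later reads, so the accumulator is the filtered sum of the untouched suffix.
theorem pv_loopA_sum (minv maxv : Int) : ∀ (n : Nat) (l cur : List Int) (k : Nat) (acc : Int),
    l.length = k + n → cur.length = l.length → cur.drop k = l.drop k →
    ((PySem.List.pyRange (k : Int) (l.length : Int) 1).foldl
      (fun (st : List Int × Int) num =>
        let v := PySem.List.pyGetD st.1 num 0
        if v = minv ∨ v = maxv then (st.1.set num.toNat 0, st.2)
        else (st.1, st.2 + v)) (cur, acc)).2
    = acc + ((l.drop k).filter (fun x => x != minv && x != maxv)).sum := by
  intro n
  induction n with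
  | zero =>
    intro l cur k acc hlen hclen hdrop
    rw [PySem.List.pyRange_one_eq_nil (by omega)]
    rw [List.drop_eq_nil_of_le (by omega)]
    simp
  | succ m ih =>
    intro l cur k acc hlen hclen hdrop
    have hk : k < l.length := by omega
    rw [PySem.List.pyRange_one_cons (by exact_mod_cast hk)]
    rw [List.foldl_cons]
    have hkc : k < cur.length := by omega
    have hget : PySem.List.pyGetD cur (k : Int) 0 = cur[k] := by
      rw [PySem.List.pyGetD_natCast]; exact List.getD_eq_getElem cur 0 hkc
    have hcurk : cur[k] = l[k] := by
      have h1 : cur.drop k = cur[k] :: cur.drop (k+1) := List.drop_eq_getElem_cons hkc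
      have h2 : l.drop k = l[k] :: l.drop (k+1) := List.drop_eq_getElem_cons hk
      rw [h1, h2] at hdrop; exact (List.cons.injEq _ _ _ _ ▸ hdrop).1
    have hdropsucc : cur.drop (k+1) = l.drop (k+1) := by
      have h1 : cur.drop k = cur[k] :: cur.drop (k+1) := List.drop_eq_getElem_cons hkc
      have h2 : l.drop k = l[k] :: l.drop (k+1) := List.drop_eq_getElem_cons hk
      rw [h1, h2] at hdrop; exact (List.cons.injEq _ _ _ _ ▸ hdrop).2
    have hfilter : (l.drop k).filter (fun x => x != minv && x != maxv)
        = if l[k] = minv ∨ l[k] = maxv then (l.drop (k+1)).filter (fun x => x != minv && x != maxv)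
          else l[k] :: (l.drop (k+1)).filter (fun x => x != minv && x != maxv) := by
      rw [List.drop_eq_getElem_cons hk, List.filter_cons]
      by_cases hc : l[k] = minv ∨ l[k] = maxv <;> simp [hc]
      · rcases hc with rfl | rfl <;> simp
      · rw [not_or] at hc; simp [hc.1, hc.2]
    have hcast : ((k : Int) + 1) = ((k + 1 : Nat) : Int) := by push_cast; ring
    simp only [hget, hcurk]
    by_cases hc : l[k] = minv ∨ l[k] = maxv
    · rw [if_pos hc]
      rw [hcast]
      have hsd : ((cur.set ((k:Int)).toNat 0)).drop (k+1) = l.drop (k+1) := by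
        rw [Int.toNat_natCast, List.drop_set]; simpa using hdropsucc
      rw [ih l (cur.set ((k:Int)).toNat 0) (k+1) acc (by omega) (by simp [hclen]) hsd]
      rw [hfilter, if_pos hc]
    · rw [if_neg hc]
      rw [hcast]
      rw [ih l cur (k+1) (acc + l[k]) (by omega) hclen hdropsucc]
      rw [hfilter, if_neg hc]
      simp; ring

-- ===== VERDICT (by name: the statement is the Claim_ definition above) =====
theorem sum_between_spec : Claim_equal_sum_between := by
  intro list1 _ hpre
  show sum_between list1 = sum_between_alt list1
  have hl0 : 0 < list1.length := by cases list1 <;> simp_all [Pre_sum_between]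
  -- the sorted copy and its extreme values
  set s : List Int := PySem.List.sorted list1 (fun x => x) false with hs
  have hslen : s.length = list1.length := PySem.List.length_sorted ..
  have hsl0 : 0 < s.length := by omega
  set a : Int := s[0] with ha
  set b : Int := s[s.length - 1]'(by omega) with hb
  have hget0 : PySem.List.pyGet? s 0 = some a := by
    rw [PySem.List.pyGet?_zero]; exact List.getElem?_eq_getElem hsl0
  have hgetm1 : PySem.List.pyGet? s (-1) = some b := by
    rw [PySem.List.pyGet?_neg_ofNat s 1 (by omega) (by omega)]
    exact List.getElem?_eq_getElem (by omega)
  have hamem : a ∈ list1 := (PySem.List.mem_sorted ..).mp (List.getElem_mem hsl0)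
  have hbmem : b ∈ list1 := (PySem.List.mem_sorted ..).mp (List.getElem_mem _)
  have halow : ∀ y ∈ list1, a ≤ y := by
    intro y hy
    have hys : y ∈ s := (PySem.List.mem_sorted ..).mpr hy
    obtain ⟨q, hq, hqe⟩ := List.mem_iff_getElem.mp hys
    rw [← hqe]
    exact PySem.List.sorted_id_getElem_mono list1 (Nat.zero_le q) hq
  have hbhigh : ∀ y ∈ list1, y ≤ b := by
    intro y hy
    have hys : y ∈ s := (PySem.List.mem_sorted ..).mpr hy
    obtain ⟨q, hq, hqe⟩ := List.mem_iff_getElem.mp hys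
    rw [← hqe]
    exact PySem.List.sorted_id_getElem_mono list1 (by omega) (by rw [← hs]; omega)
  -- list.index recovers the extreme values
  obtain ⟨mi, hmi⟩ := Option.isSome_iff_exists.mp ((PySem.List.index?_isSome_iff ..).mpr hamem)
  obtain ⟨ma, hma⟩ := Option.isSome_iff_exists.mp ((PySem.List.index?_isSome_iff ..).mpr hbmem)
  obtain ⟨hmilt, hmiv, -⟩ := PySem.List.getElem_of_index?_eq_some hmi
  obtain ⟨hmalt, hmav, -⟩ := PySem.List.getElem_of_index?_eq_some hma
  have hminv : PySem.List.pyGetD list1 (mi : Int) 0 = a := by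
    rw [PySem.List.pyGetD_natCast, List.getD_eq_getElem list1 0 hmilt, hmiv]
  have hmaxv : PySem.List.pyGetD list1 (ma : Int) 0 = b := by
    rw [PySem.List.pyGetD_natCast, List.getD_eq_getElem list1 0 hmalt, hmav]
  -- A's loop result
  have hloop := pv_loopA_sum a b s.length s s 0 0 (by omega) rfl rfl
  have hsum : (s.filter (fun x => x != a && x != b)).sum
      = (list1.filter (fun x => x != a && x != b)).sum :=
    ((PySem.List.sorted_perm ..).filter _).sum_eq
  -- reduce A's port
  have hA : sum_between list1 = pvMsg list1 a b ((list1.filter (fun x => x != a && x != b)).sum) := by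
    unfold sum_between
    rw [← hs]
    dsimp only
    rw [hget0, hgetm1]
    dsimp only
    rw [hmi, hma]
    dsimp only
    rw [hminv, hmaxv]
    rw [Nat.cast_zero] at hloop
    rw [hloop, List.drop_zero, hsum, zero_add]
  -- reduce B's port
  have hgetB : PySem.List.pyGet? list1 0 = some (list1[0]) := by
    rw [PySem.List.pyGet?_zero]; exact List.getElem?_eq_getElem hl0
  obtain ⟨hm1, hm2, hm3⟩ := pv_foldMin list1 list1[0]
  obtain ⟨hx1, hx2, hx3⟩ := pv_foldMax list1 list1[0]
  have h0mem : list1[0] ∈ list1 := List.getElem_mem hl0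
  have hmn : list1.foldl (fun m x => if x < m then x else m) list1[0] = a := by
    apply le_antisymm
    · exact hm3 a hamem
    · apply halow
      rcases hm1 with h | h
      · rw [h]; exact h0mem
      · exact h
  have hmx : list1.foldl (fun m x => if x > m then x else m) list1[0] = b := by
    apply le_antisymm
    · apply hbhigh
      rcases hx1 with h | h
      · rw [h]; exact h0mem
      · exact h
    · exact hx3 b hbmem
  have hB : sum_between_alt list1 = pvMsg list1 a b ((list1.filter (fun x => x != a && x != b)).sum) := by
    unfold sum_between_alt
    rw [hgetB]
    simp only
    rw [PySem.List.foldl_prod_mk (f := fun m x => if x < m then x else m)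
        (g := fun m x => if x > m then x else m), hmn, hmx]
  rw [hA, hB]
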